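-- pv_equiv track=rewrite | github.com/Midhilesh4890/Leetcode-Problems | Google/Onsite/bankcustomers.py | max_customers_served
-- ===== SOURCE A (Python) =====
-- def max_customers_served(X, transactions):
--     n = len(transactions)
--     m = n + 1  # Length of prefix sum array Q
--     # Build prefix sum array Q such that Q[0] = 0 and Q[i+1] = Q[i] + transactions[i]
--     Q = [0] * m
--     for i in range(n):
--         Q[i + 1] = Q[i] + transactions[i]
--
--     # Build Sparse Table for range minimum queries on Q.
--     log = [0] * (m + 1)
--     for i in range(2, m + 1):
--         log[i] = log[i // 2] + 1
--
--     k = log[m] + 1  # Number of levels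
--     st = [[0] * m for _ in range(k)]
--     # Level 0 of the sparse table: just the array Q itself.
--     for i in range(m):
--         st[0][i] = Q[i]
--
--     j = 1
--     while (1 << j) <= m:
--         for i in range(m - (1 << j) + 1):
--             st[j][i] = min(st[j - 1][i], st[j - 1][i + (1 << (j - 1))])
--         j += 1
--
--     # Function to query the minimum in Q from index L to R (inclusive)
--     def query_min(L, R):
--         length = R - L + 1
--         j = log[length]
--         return min(st[j][L], st[j][R - (1 << j) + 1])
--
--     max_served = 0
--     # For each starting index i (which means before serving customer i, with initial funds X)
--     # the condition for serving customers from i to j is: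
--     #   X + (Q[t] - Q[i]) >= 0  for all t in [i+1, j+1]
--     # Equivalently: Q[t] >= Q[i] - X.
--     for i in range(m):
--         threshold = Q[i] - X
--         lo, hi = i + 1, m - 1
--         best = i  # best valid index found in Q (if best remains i, no customer is served)
--         while lo <= hi:
--             mid = (lo + hi) // 2
--             if query_min(i + 1, mid) >= threshold:
--                 best = mid  # mid is valid, try to extend further
--                 lo = mid + 1
--             else:
--                 hi = mid - 1
--         served = best - i  # served customers count = (j+1) - i, i.e. j - i + 1
--         if served > max_served:
--             max_served = served
--
--     return max_served
-- ===== SOURCE B (Python) =====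
-- def max_customers_served(X, transactions):
--     best = 0
--     for i in range(len(transactions)):
--         balance = X
--         served = 0
--         for t in transactions[i:]:
--             balance += t
--             if balance < 0:
--                 break
--             served += 1
--         if served > best:
--             best = served
--     return best
-- ===== Notes on version B (the rewrite author's own statement) =====
-- stated objective: simpler
-- what changed: Replaced the prefix-sum + sparse-table RMQ + per-start binary-search machinery with a direct double loop that simulates serving customers from each start index and tracks the maximum run.
import Mathlib
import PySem

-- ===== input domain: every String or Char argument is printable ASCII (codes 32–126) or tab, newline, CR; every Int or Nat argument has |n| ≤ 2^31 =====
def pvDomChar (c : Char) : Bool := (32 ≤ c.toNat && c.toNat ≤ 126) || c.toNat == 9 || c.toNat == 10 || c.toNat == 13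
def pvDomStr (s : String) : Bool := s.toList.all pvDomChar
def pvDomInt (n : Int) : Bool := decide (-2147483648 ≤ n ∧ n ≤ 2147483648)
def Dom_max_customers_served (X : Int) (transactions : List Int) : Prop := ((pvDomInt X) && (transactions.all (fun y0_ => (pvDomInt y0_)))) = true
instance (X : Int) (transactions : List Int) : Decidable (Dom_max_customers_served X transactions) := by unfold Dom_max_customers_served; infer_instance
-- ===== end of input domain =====

-- B replaces A's prefix-sum + sparse-table RMQ + per-start binary search by a plain double
-- loop simulating service from each start (objective: simpler; not faster).

-- ===== PORT A =====
-- A's arrays Q, log and st are filled by recurrences and only read at indices the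
-- recurrence has filled; the port computes the same recurrences demand-driven:
-- QA ts i = Q[i], logA i = log[i], stA ts j i = st[j][i] (at every index A ever reads).

-- Q[0] = 0; Q[i+1] = Q[i] + transactions[i]
def QA (ts : List Int) : Nat → Int
  | 0 => 0
  | i + 1 => QA ts i + ts.getD i 0

-- log[0] = log[1] = 0; log[i] = log[i // 2] + 1
def logA : Nat → Nat
  | 0 => 0
  | 1 => 0
  | (n + 2) => logA ((n + 2) / 2) + 1
decreasing_by omega

-- st[0][i] = Q[i]; st[j][i] = min(st[j-1][i], st[j-1][i + 2^(j-1)])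
def stA (ts : List Int) : Nat → Nat → Int
  | 0, i => QA ts i
  | j + 1, i => min (stA ts j i) (stA ts j (i + 2 ^ j))

-- query_min(L, R); R - (1 << j) + 1 is computed as R + 1 - 2^j (equal whenever L ≤ R,
-- the only way A calls it, since then 2^j ≤ R + 1 - L ≤ R + 1)
def queryMinA (ts : List Int) (L R : Nat) : Int :=
  let j := logA (R + 1 - L)
  min (stA ts j L) (stA ts j (R + 1 - 2 ^ j))

-- the 'while lo <= hi' binary search; fuel only makes the loop total (hi+1-lo shrinks
-- each iteration, so fuel = m always suffices); hi = mid - 1 uses Nat subtraction,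
-- exact because in every reachable state mid ≥ lo ≥ i + 1 ≥ 1
def bsA (ts : List Int) (thr : Int) (i : Nat) : Nat → Nat → Nat → Nat → Nat
  | 0, _, _, best => best
  | fuel + 1, lo, hi, best =>
    if lo ≤ hi then
      let mid := (lo + hi) / 2
      if thr ≤ queryMinA ts (i + 1) mid then
        bsA ts thr i fuel (mid + 1) hi mid
      else
        bsA ts thr i fuel lo (mid - 1) best
    else best

def max_customers_served (X : Int) (transactions : List Int) : Int :=
  let n := transactions.length
  let m := n + 1
  (List.range m).foldl (fun max_served i =>
    let best := bsA transactions (QA transactions i - X) i m (i + 1) (m - 1) i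
    let served : Int := (best : Int) - (i : Int)
    if max_served < served then served else max_served) 0

-- ===== PORT B =====
-- the inner 'for t in transactions[i:]' loop with its break
def serveLoopB (balance served : Int) : List Int → Int
  | [] => served
  | t :: rest => if balance + t < 0 then served else serveLoopB (balance + t) (served + 1) rest

def max_customers_served_alt (X : Int) (transactions : List Int) : Int :=
  (List.range transactions.length).foldl (fun best i =>
    -- transactions[i:] with 0 ≤ i is List.drop i
    let s := serveLoopB X 0 (transactions.drop i)
    if best < s then s else best) 0

-- ===== PRECONDITION & SPEC =====
def Spec_max_customers_served (X : Int) (transactions : List Int) (out : Int) : Prop := out = max_customers_served_alt X transactions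
instance (X : Int) (transactions : List Int) (out : Int) : Decidable (Spec_max_customers_served X transactions out) := by unfold Spec_max_customers_served; infer_instance

-- ===== CLAIM (what is proved, stated in full; the proofs are below) =====
def Claim_equal_max_customers_served : Prop := ∀ (X : Int) (transactions : List Int), Dom_max_customers_served X transactions → Spec_max_customers_served X transactions (max_customers_served X transactions)

-- ===== LEMMAS AND PROOFS =====

-- Nat-valued count of the inner loop of B
def CountF (bal : Int) : List Int → Nat
  | [] => 0
  | t :: r => if bal + t < 0 then 0 else CountF (bal + t) r + 1

theorem serveLoopB_eq (b c : Int) (l : List Int) : serveLoopB b c l = c + (CountF b l : Int) := by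
  induction l generalizing b c with
  | nil => simp [serveLoopB, CountF]
  | cons t r ih =>
    simp only [serveLoopB, CountF]
    split
    · simp
    · rw [ih]; push_cast; ring

-- "all of Q (i, e] is ≥ Q i - X": serving customers i..e-1 keeps the balance nonnegative
def Vp (X : Int) (ts : List Int) (i e : Nat) : Prop :=
  ∀ u, i < u → u ≤ e → QA ts i - X ≤ QA ts u

theorem countF_char (X : Int) (ts : List Int) (i : Nat) :
    ∀ d j, ts.length - j = d → j ≤ ts.length →
      (j + CountF (X + QA ts j - QA ts i) (ts.drop j) ≤ ts.length) ∧
      (∀ u, j < u → u ≤ j + CountF (X + QA ts j - QA ts i) (ts.drop j) → QA ts i - X ≤ QA ts u) ∧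
      (j + CountF (X + QA ts j - QA ts i) (ts.drop j) = ts.length ∨
        QA ts (j + CountF (X + QA ts j - QA ts i) (ts.drop j) + 1) < QA ts i - X) := by
  intro d
  induction d with
  | zero =>
    intro j hd hj
    have hjn : j = ts.length := by omega
    subst hjn
    rw [List.drop_length]
    simp only [CountF]
    exact ⟨by omega, fun u h1 h2 => absurd h2 (by omega), Or.inl (by omega)⟩
  | succ d ih =>
    intro j hd hj
    have hjlt : j < ts.length := by omega
    have hdrop : ts.drop j = ts[j] :: ts.drop (j + 1) := List.drop_eq_getElem_cons hjlt
    have hQ : QA ts (j + 1) = QA ts j + ts[j] := by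
      simp [QA, List.getD, List.getElem?_eq_getElem hjlt]
    rw [hdrop]
    simp only [CountF]
    have harg : X + QA ts j - QA ts i + ts[j] = X + QA ts (j + 1) - QA ts i := by
      rw [hQ]; ring
    rw [harg]
    by_cases hneg : X + QA ts (j + 1) - QA ts i < 0
    · rw [if_pos hneg]
      refine ⟨by omega, fun u h1 h2 => absurd h2 (by omega), Or.inr ?_⟩
      simp only [Nat.add_zero]
      omega
    · rw [if_neg hneg]
      obtain ⟨g1, g2, g3⟩ := ih (j + 1) (by omega) (by omega)
      refine ⟨by omega, ?_, ?_⟩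
      · intro u h1 h2
        by_cases he : u = j + 1
        · subst he; omega
        · exact g2 u (by omega) (by omega)
      · rcases g3 with h | h
        · left; omega
        · right
          have he : j + (CountF (X + QA ts (j + 1) - QA ts i) (ts.drop (j + 1)) + 1) + 1
              = j + 1 + CountF (X + QA ts (j + 1) - QA ts i) (ts.drop (j + 1)) + 1 := by omega
          rw [he]; exact h

theorem stA_ge_iff (ts : List Int) (thr : Int) :
    ∀ j i0, (thr ≤ stA ts j i0 ↔ ∀ u, i0 ≤ u → u < i0 + 2 ^ j → thr ≤ QA ts u) := by
  intro j
  induction j with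
  | zero =>
    intro i0
    simp only [stA, pow_zero]
    constructor
    · intro h u h1 h2
      have : u = i0 := by omega
      subst this; exact h
    · intro h; exact h i0 le_rfl (by omega)
  | succ j ih =>
    intro i0
    have hp : (2 : ℕ) ^ (j + 1) = 2 ^ j + 2 ^ j := by rw [pow_succ]; ring
    simp only [stA, le_min_iff, ih]
    constructor
    · rintro ⟨h1, h2⟩ u hu1 hu2
      by_cases hc : u < i0 + 2 ^ j
      · exact h1 u hu1 hc
      · exact h2 u (by omega) (by omega)
    · intro h
      exact ⟨fun u hu1 hu2 => h u hu1 (by omega),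
             fun u hu1 hu2 => h u (by omega) (by omega)⟩

theorem logA_bounds : ∀ len, 1 ≤ len → 2 ^ logA len ≤ len ∧ len < 2 ^ (logA len + 1) := by
  intro len
  induction len using Nat.strong_induction_on with
  | _ len ih =>
    intro h1
    match len, h1 with
    | 1, _ => simp [logA]
    | (n + 2), _ =>
      have e : logA (n + 2) = logA ((n + 2) / 2) + 1 := by rw [logA]
      obtain ⟨a, b⟩ := ih ((n + 2) / 2) (by omega) (by omega)
      rw [e]
      have hp2 : (2 : ℕ) ^ (logA ((n + 2) / 2) + 1) = 2 * 2 ^ logA ((n + 2) / 2) := by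
        rw [pow_succ]; ring
      have hp4 : (2 : ℕ) ^ (logA ((n + 2) / 2) + 1 + 1) = 4 * 2 ^ logA ((n + 2) / 2) := by
        rw [pow_succ, pow_succ]; ring
      rw [hp2] at b ⊢
      rw [hp4]
      omega

theorem queryMinA_ge_iff (ts : List Int) (thr : Int) (L R : Nat) (h : L ≤ R) :
    (thr ≤ queryMinA ts L R ↔ ∀ u, L ≤ u → u ≤ R → thr ≤ QA ts u) := by
  obtain ⟨hb1, hb2⟩ := logA_bounds (R + 1 - L) (by omega)
  have hp2 : (2 : ℕ) ^ (logA (R + 1 - L) + 1) = 2 * 2 ^ logA (R + 1 - L) := by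
    rw [pow_succ]; ring
  rw [hp2] at hb2
  have hp1 : 1 ≤ (2 : ℕ) ^ logA (R + 1 - L) := Nat.one_le_two_pow
  simp only [queryMinA, le_min_iff, stA_ge_iff]
  constructor
  · rintro ⟨h1, h2⟩ u hu1 hu2
    by_cases hc : u < L + 2 ^ logA (R + 1 - L)
    · exact h1 u hu1 hc
    · exact h2 u (by omega) (by omega)
  · intro hall
    exact ⟨fun u hu1 hu2 => hall u hu1 (by omega),
           fun u hu1 hu2 => hall u (by omega) (by omega)⟩

theorem bsA_succ (ts : List Int) (thr : Int) (i fuel lo hi best : Nat) :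
    bsA ts thr i (fuel + 1) lo hi best =
      if lo ≤ hi then
        (if thr ≤ queryMinA ts (i + 1) ((lo + hi) / 2) then
          bsA ts thr i fuel ((lo + hi) / 2 + 1) hi ((lo + hi) / 2)
        else bsA ts thr i fuel lo ((lo + hi) / 2 - 1) best)
      else best := rfl

theorem bsA_post (X : Int) (ts : List Int) (i : Nat) :
    ∀ fuel lo hi best, hi + 1 - lo ≤ fuel → lo = best + 1 → i ≤ best → best ≤ ts.length →
      hi ≤ ts.length → Vp X ts i best →
      (∀ s, hi < s → s ≤ ts.length → Vp X ts i s → s ≤ best) →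
      (i ≤ bsA ts (QA ts i - X) i fuel lo hi best ∧
       bsA ts (QA ts i - X) i fuel lo hi best ≤ ts.length ∧
       Vp X ts i (bsA ts (QA ts i - X) i fuel lo hi best) ∧
       (∀ s, s ≤ ts.length → Vp X ts i s → s ≤ bsA ts (QA ts i - X) i fuel lo hi best)) := by
  intro fuel
  induction fuel with
  | zero =>
    intro lo hi best hfuel hlo hib hbn hhn hV hlast
    simp only [bsA]
    refine ⟨hib, hbn, hV, fun s hs hVs => ?_⟩
    by_cases hsh : hi < s
    · exact hlast s hsh hs hVs
    · omega
  | succ fuel ih =>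
    intro lo hi best hfuel hlo hib hbn hhn hV hlast
    rw [bsA_succ]
    by_cases hlh : lo ≤ hi
    · rw [if_pos hlh]
      have hmid1 : lo ≤ (lo + hi) / 2 := by omega
      have hmid2 : (lo + hi) / 2 ≤ hi := by omega
      by_cases hq : QA ts i - X ≤ queryMinA ts (i + 1) ((lo + hi) / 2)
      · rw [if_pos hq]
        have hVmid : Vp X ts i ((lo + hi) / 2) := by
          intro u h1 h2
          exact (queryMinA_ge_iff ts (QA ts i - X) (i + 1) ((lo + hi) / 2) (by omega)).mp hq
            u (by omega) h2
        exact ih ((lo + hi) / 2 + 1) hi ((lo + hi) / 2) (by omega) rfl (by omega) (by omega)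
          hhn hVmid (fun s hs1 hs2 hVs => le_trans (hlast s hs1 hs2 hVs) (by omega))
      · rw [if_neg hq]
        have hnV : ¬ Vp X ts i ((lo + hi) / 2) := fun hv =>
          hq ((queryMinA_ge_iff ts (QA ts i - X) (i + 1) ((lo + hi) / 2) (by omega)).mpr
            (fun u h1 h2 => hv u (by omega) h2))
        refine ih lo ((lo + hi) / 2 - 1) best (by omega) hlo hib hbn (by omega) hV ?_
        intro s hs1 hs2 hVs
        by_cases hsh : hi < s
        · exact hlast s hsh hs2 hVs
        · exfalso
          apply hnV
          intro u h1 h2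
          exact hVs u h1 (by omega)
    · rw [if_neg hlh]
      refine ⟨hib, hbn, hV, fun s hs hVs => ?_⟩
      by_cases hsh : hi < s
      · exact hlast s hsh hs hVs
      · omega

theorem step_eq (X : Int) (ts : List Int) (i : Nat) (hi : i ≤ ts.length) :
    (bsA ts (QA ts i - X) i (ts.length + 1) (i + 1) ts.length i : Int) - (i : Int)
      = (CountF X (ts.drop i) : Int) := by
  obtain ⟨hb1, hb2, hb3, hb4⟩ := bsA_post X ts i (ts.length + 1) (i + 1) ts.length i
    (by omega) rfl le_rfl hi le_rfl
    (fun u h1 h2 => absurd h2 (by omega))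
    (fun s hs1 hs2 _ => absurd hs1 (by omega))
  obtain ⟨hc1, hc2, hc3⟩ := countF_char X ts i (ts.length - i) i rfl hi
  have harg : X + QA ts i - QA ts i = X := by ring
  rw [harg] at hc1 hc2 hc3
  have hEb : i + CountF X (ts.drop i) ≤ bsA ts (QA ts i - X) i (ts.length + 1) (i + 1) ts.length i :=
    hb4 (i + CountF X (ts.drop i)) hc1 hc2
  have hbE : bsA ts (QA ts i - X) i (ts.length + 1) (i + 1) ts.length i ≤ i + CountF X (ts.drop i) := by
    by_contra hcon
    rcases hc3 with he | hq
    · omega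
    · exact absurd (hb3 (i + CountF X (ts.drop i) + 1) (by omega) (by omega)) (not_le.mpr hq)
  have hbeq : bsA ts (QA ts i - X) i (ts.length + 1) (i + 1) ts.length i = i + CountF X (ts.drop i) :=
    le_antisymm hbE hEb
  rw [hbeq]
  push_cast
  ring

theorem foldl_le (l : List Nat) (f : Int → Nat → Int) (h : ∀ a x, a ≤ f a x) :
    ∀ a : Int, a ≤ l.foldl f a := by
  induction l with
  | nil => intro a; simp
  | cons x r ih => intro a; exact le_trans (h a x) (ih (f a x))

-- ===== VERDICT (by name: the statement is the Claim_ definition above) =====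
theorem max_customers_served_spec : Claim_equal_max_customers_served := by
  intro X ts _
  unfold Spec_max_customers_served max_customers_served max_customers_served_alt
  dsimp only
  simp only [Nat.add_sub_cancel]
  rw [List.range_succ, List.foldl_append, List.foldl_cons, List.foldl_nil]
  have hB : ∀ i : Nat, serveLoopB X 0 (ts.drop i) = (CountF X (ts.drop i) : Int) := by
    intro i; rw [serveLoopB_eq]; ring
  have hcong :
      (List.range ts.length).foldl (fun max_served i =>
        let best := bsA ts (QA ts i - X) i (ts.length + 1) (i + 1) ts.length i
        let served : Int := (best : Int) - (i : Int)
        if max_served < served then served else max_served) 0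
      = (List.range ts.length).foldl (fun best i =>
        let s := serveLoopB X 0 (ts.drop i)
        if best < s then s else best) 0 := by
    apply PySem.List.foldl_congr_mem
    intro acc x hx
    have hxlt : x < ts.length := List.mem_range.mp hx
    dsimp only
    rw [step_eq X ts x (le_of_lt hxlt), hB]
  rw [hcong]
  have hge : (0 : Int) ≤ (List.range ts.length).foldl (fun best i =>
      let s := serveLoopB X 0 (ts.drop i)
      if best < s then s else best) 0 := by
    apply foldl_le
    intro a x
    dsimp only
    split_ifs with h
    · exact le_of_lt h
    · exact le_rfl
  dsimp only
  have hzero : (bsA ts (QA ts ts.length - X) ts.length (ts.length + 1) (ts.length + 1)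
      ts.length ts.length : Int) - (ts.length : Int) = 0 := by
    have h := step_eq X ts ts.length le_rfl
    rw [List.drop_length] at h
    simpa [CountF] using h
  rw [hzero, if_neg (not_lt.mpr hge)]
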